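-- pv_equiv track=rewrite | github.com/lmangani/parlor | src/server.py | _looks_like_leaked_tool_output
-- ===== SOURCE A (Python) =====
-- def _looks_like_leaked_tool_output(s: str | None) -> bool:
--     if not s or not str(s).strip():
--         return False
--     t = str(s)
--     needles = (
--         "<|tool_call",
--         "<tool_call",
--         "<|tool>declaration",
--         "<|tool>",
--         "declaration:web_search",
--         "call:respond_to_user",
--         "display_context:<|",
--         "<tool_response",
--     )
--     return any(n in t for n in needles)
-- ===== SOURCE B (Python) =====
-- def _looks_like_leaked_tool_output(s: str | None) -> bool:
--     if not s or not str(s).strip():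
--         return False
--     t = str(s)
--     needles = (
--         "<|tool_call",
--         "<tool_call",
--         "<|tool>declaration",
--         "<|tool>",
--         "declaration:web_search",
--         "call:respond_to_user",
--         "display_context:<|",
--         "<tool_response",
--     )
--     # one pass over positions: does any needle start at i?
--     return any(t.startswith(needles, i) for i in range(len(t)))
-- ===== Notes on version B (the rewrite author's own statement) =====
-- stated objective: alternative
-- what changed: Replaces eight independent full-string substring scans ('n in t' per needle) by a single left-to-right pass over positions, testing at each position whether any needle starts there via tuple-startswith.
import Mathlib
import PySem

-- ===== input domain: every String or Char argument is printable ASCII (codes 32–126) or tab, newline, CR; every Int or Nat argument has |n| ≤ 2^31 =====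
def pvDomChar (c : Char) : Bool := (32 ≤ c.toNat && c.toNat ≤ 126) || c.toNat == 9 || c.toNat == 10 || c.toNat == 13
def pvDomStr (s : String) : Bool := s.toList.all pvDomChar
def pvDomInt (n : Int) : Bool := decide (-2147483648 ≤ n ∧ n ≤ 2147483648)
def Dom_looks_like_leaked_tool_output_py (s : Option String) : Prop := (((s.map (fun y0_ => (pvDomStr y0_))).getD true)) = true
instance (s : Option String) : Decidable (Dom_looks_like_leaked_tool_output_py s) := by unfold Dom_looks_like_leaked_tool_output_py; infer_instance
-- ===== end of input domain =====

-- B replaces A's eight independent substring scans by one left-to-right pass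
-- over positions testing whether any needle starts at the position (alternative, same cost).

-- ===== PORT A =====
def pvNeedles : List String :=
  ["<|tool_call", "<tool_call", "<|tool>declaration", "<|tool>",
   "declaration:web_search", "call:respond_to_user", "display_context:<|", "<tool_response"]

def looks_like_leaked_tool_output_py (s : Option String) : Bool :=
  match s with
  | none => false
  | some t =>
    if t == "" then false
    else if PySem.Str.strip t == "" then false
    else pvNeedles.any (fun n => PySem.Str.isIn n t)

-- ===== PORT B =====
-- the inner 'any needle starts at position i' of Source B, as recursion over the suffix at i
def pvScan (l : List Char) : Bool :=
  match l with
  | [] => false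
  | c :: rest => pvNeedles.any (fun n => PySem.Chars.startswith (c :: rest) n.toList) || pvScan rest

def looks_like_leaked_tool_output_py_alt (s : Option String) : Bool :=
  match s with
  | none => false
  | some t =>
    if t == "" then false
    else if PySem.Str.strip t == "" then false
    else pvScan t.toList

-- ===== PRECONDITION & SPEC =====
def Spec_looks_like_leaked_tool_output_py (s : Option String) (out : Bool) : Prop := out = looks_like_leaked_tool_output_py_alt s
instance (s : Option String) (out : Bool) : Decidable (Spec_looks_like_leaked_tool_output_py s out) := by unfold Spec_looks_like_leaked_tool_output_py; infer_instance

-- ===== CLAIM (what is proved, stated in full; the proofs are below) =====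
def Claim_equal_looks_like_leaked_tool_output_py : Prop := ∀ (s : Option String), Dom_looks_like_leaked_tool_output_py s → Spec_looks_like_leaked_tool_output_py s (looks_like_leaked_tool_output_py s)

-- ===== LEMMAS AND PROOFS =====

theorem pvScan_iff (l : List Char) : pvScan l = true ↔ ∃ n ∈ pvNeedles, n.toList <:+: l := by
  induction l with
  | nil =>
    constructor
    · intro h; simp [pvScan] at h
    rintro ⟨n, hn, hinf⟩
    have h0 : n.toList = [] := List.eq_nil_of_infix_nil hinf
    fin_cases hn <;> simp_all
  | cons c rest ih =>
    simp only [pvScan, Bool.or_eq_true, List.any_eq_true, PySem.Chars.startswith_iff, ih,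
      List.infix_cons_iff]
    constructor
    · rintro (⟨n, hn, hp⟩ | ⟨n, hn, hi⟩) <;> exact ⟨n, hn, by tauto⟩
    · rintro ⟨n, hn, hp | hi⟩
      · exact Or.inl ⟨n, hn, hp⟩
      · exact Or.inr ⟨n, hn, hi⟩

theorem pvScan_eq_any (t : String) :
    pvScan t.toList = pvNeedles.any (fun n => PySem.Str.isIn n t) := by
  rcases h : pvScan t.toList with _ | _
  · symm
    rw [Bool.eq_false_iff]
    intro hc
    rw [List.any_eq_true] at hc
    obtain ⟨n, hn, hin⟩ := hc
    rw [PySem.Str.isIn_iff_infix] at hin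
    have := (pvScan_iff t.toList).2 ⟨n, hn, hin⟩
    simp [this] at h
  · symm
    rw [List.any_eq_true]
    obtain ⟨n, hn, hin⟩ := (pvScan_iff t.toList).1 h
    exact ⟨n, hn, (PySem.Str.isIn_iff_infix n t).2 hin⟩

-- ===== VERDICT (by name: the statement is the Claim_ definition above) =====
theorem looks_like_leaked_tool_output_py_spec : Claim_equal_looks_like_leaked_tool_output_py := by
  intro s _
  unfold Spec_looks_like_leaked_tool_output_py looks_like_leaked_tool_output_py looks_like_leaked_tool_output_py_alt
  cases s with
  | none => rfl
  | some t =>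
    by_cases h1 : t == "" <;> simp only [h1, if_true]
    by_cases h2 : PySem.Str.strip t == "" <;> simp only [h2, if_true]
    exact (pvScan_eq_any t).symm
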